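-- pv_equiv track=rewrite | github.com/phac-nml/staramr | staramr/detection/AMRDetection.py | _get_quality_module
-- ===== SOURCE A (Python) =====
-- def _get_quality_module(genome_length_feedback,N50_feedback,contigs_under_minimum_bp_feedback,files):
--     """
--     Goes through the files and for each provides detailed feedback for why they failed the quality metrics
--     :param genome_length_feedback: An array where each element is the feedback (true or false) for the corresponding file in regards to the
--     genome length quality metric
--     :param N50_feedback: An array where each element is the feedback (true or false) for the corresponding file in regards to the
--     the N50 quality metric
--     :param contigs_under_minimum_bp_feedback: An array where each element is the feedback (true or false) for the corresponding file in regards to the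
--     the acceptable number of contigs under the minimum length quality metric
--     :param files: The files for which we wish to create quality modules
--     :return: An array where the first element is itself an array where each element is the detailed quality metric feedback for
--     the corresponding file. The second element is itself an array where each element is the feedback (true or false)
--     for whether the corresponding file passes all of the quality metrics
--     """
--     file_index = 0
--     feedback = []
--     quality_parameter = []
--     quality_parameter_feedback = []
--     for file in files:
--         if genome_length_feedback[file_index] == True & N50_feedback[file_index] == True & contigs_under_minimum_bp_feedback[file_index] == True:
--             quality_parameter_feedback_for_file=("")
--             quality_parameter.append("Passed")
--         else:
--             quality_parameter_feedback_for_file=""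
--             quality_parameter.append("Failed")
--             if genome_length_feedback[file_index] == False:
--                 quality_parameter_feedback_for_file = quality_parameter_feedback_for_file + "Genome length is not within the acceptable length range. "
--             if N50_feedback[file_index] == False:
--                 quality_parameter_feedback_for_file = quality_parameter_feedback_for_file + "N50 value is not greater than the specified minimum value. "
--             if contigs_under_minimum_bp_feedback[file_index] == False:
--                 quality_parameter_feedback_for_file = quality_parameter_feedback_for_file + "Number of Contigs with a length less than the minimum length exceeds the acceptable number. "
--
--         quality_parameter_feedback.append(quality_parameter_feedback_for_file)
--         file_index=file_index+1
--     feedback.append(quality_parameter_feedback)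
--     feedback.append(quality_parameter)
--     return feedback
-- ===== SOURCE B (Python) =====
-- _GL_MSG = "Genome length is not within the acceptable length range. "
-- _N50_MSG = "N50 value is not greater than the specified minimum value. "
-- _CONTIGS_MSG = "Number of Contigs with a length less than the minimum length exceeds the acceptable number. "
--
--
-- def _get_quality_module(genome_length_feedback, N50_feedback, contigs_under_minimum_bp_feedback, files):
--     n = len(files)
--     # columnar passes: one message column per metric ("" where the metric passed)
--     gl_col = ["" if ok else _GL_MSG for ok in genome_length_feedback[:n]]
--     n50_col = ["" if ok else _N50_MSG for ok in N50_feedback[:n]]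
--     contigs_col = ["" if ok else _CONTIGS_MSG for ok in contigs_under_minimum_bp_feedback[:n]]
--     # elementwise join of the columns; a file passed iff its joined message is empty
--     feedback = [g + m + c for g, m, c in zip(gl_col, n50_col, contigs_col)]
--     status = ["Passed" if msg == "" else "Failed" for msg in feedback]
--     return [feedback, status]
-- ===== Notes on version B (the rewrite author's own statement) =====
-- stated objective: alternative
-- what changed: Replaces A's indexed per-file loop with branching over three flags by a columnar computation: three independent map passes turn each metric column into message fragments, the feedback string is the elementwise concatenation of the columns, and Passed/Failed is derived from whether the joined feedback string is empty rather than from the flags.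
import Mathlib
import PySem

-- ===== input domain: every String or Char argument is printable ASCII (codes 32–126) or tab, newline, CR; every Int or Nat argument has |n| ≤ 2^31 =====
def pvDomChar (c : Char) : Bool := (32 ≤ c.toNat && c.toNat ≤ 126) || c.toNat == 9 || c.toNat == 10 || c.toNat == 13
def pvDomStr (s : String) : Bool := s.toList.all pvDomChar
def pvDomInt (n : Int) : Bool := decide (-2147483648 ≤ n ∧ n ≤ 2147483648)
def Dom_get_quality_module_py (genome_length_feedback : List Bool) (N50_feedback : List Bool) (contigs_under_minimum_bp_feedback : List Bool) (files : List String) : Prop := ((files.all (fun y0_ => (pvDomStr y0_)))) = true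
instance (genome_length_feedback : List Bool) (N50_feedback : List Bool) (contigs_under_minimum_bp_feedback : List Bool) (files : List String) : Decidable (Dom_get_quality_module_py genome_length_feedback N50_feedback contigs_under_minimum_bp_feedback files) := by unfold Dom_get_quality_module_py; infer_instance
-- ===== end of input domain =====

-- B replaces A's indexed per-file loop with three columnar map passes over the flag lists,
-- an elementwise join of the message columns, and a status column derived from whether the
-- joined feedback string is empty (objective: alternative).

-- ===== PORT A =====

-- xs[i] for a nonnegative index; under Pre_ the index is always in range, so the
-- default is never used (outside Pre_ Python raises IndexError).
def pvLookupA (xs : List Bool) (i : Nat) : Bool :=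
  (PySem.List.pyGet? xs (Int.ofNat i)).getD false

-- the per-file body of A's loop: (quality_parameter_feedback_for_file, quality_parameter entry)
def pvRowA (g n c : Bool) : String × String :=
  -- Python's `g == True & n == True & c == True` is the chained comparison
  -- (g == (True & n)) and ((True & n) == (True & c)) and ((True & c) == True)
  if (g == (true && n)) && ((true && n) == (true && c)) && ((true && c) == true) then
    ("", "Passed")
  else
    let s0 := ""
    let s1 := if g == false then s0 ++ "Genome length is not within the acceptable length range. " else s0
    let s2 := if n == false then s1 ++ "N50 value is not greater than the specified minimum value. " else s1
    let s3 := if c == false then s2 ++ "Number of Contigs with a length less than the minimum length exceeds the acceptable number. " else s2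
    (s3, "Failed")

def pvStepA (gl n50 cb : List Bool) (st : Nat × List String × List String) (_file : String) :
    Nat × List String × List String :=
  let r := pvRowA (pvLookupA gl st.1) (pvLookupA n50 st.1) (pvLookupA cb st.1)
  (st.1 + 1, st.2.1 ++ [r.1], st.2.2 ++ [r.2])

def get_quality_module_py (genome_length_feedback : List Bool) (N50_feedback : List Bool) (contigs_under_minimum_bp_feedback : List Bool) (files : List String) : List (List String) :=
  let fin := files.foldl (pvStepA genome_length_feedback N50_feedback contigs_under_minimum_bp_feedback) (0, [], [])
  [fin.2.1, fin.2.2]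

-- ===== PORT B =====

def pvGlMsg (ok : Bool) : String :=
  if ok then "" else "Genome length is not within the acceptable length range. "
def pvN50Msg (ok : Bool) : String :=
  if ok then "" else "N50 value is not greater than the specified minimum value. "
def pvContigsMsg (ok : Bool) : String :=
  if ok then "" else "Number of Contigs with a length less than the minimum length exceeds the acceptable number. "

def get_quality_module_py_alt (genome_length_feedback : List Bool) (N50_feedback : List Bool) (contigs_under_minimum_bp_feedback : List Bool) (files : List String) : List (List String) :=
  let n := files.length
  let gl_col := (genome_length_feedback.take n).map pvGlMsg
  let n50_col := (N50_feedback.take n).map pvN50Msg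
  let contigs_col := (contigs_under_minimum_bp_feedback.take n).map pvContigsMsg
  let feedback := List.zipWith (fun g mc => g ++ mc) gl_col
    (List.zipWith (fun m c => m ++ c) n50_col contigs_col)
  let status := feedback.map (fun msg => if msg == "" then "Passed" else "Failed")
  [feedback, status]

-- ===== PRECONDITION & SPEC =====
-- A raises IndexError when any feedback list is shorter than files; those inputs are excluded.
def Pre_get_quality_module_py (genome_length_feedback : List Bool) (N50_feedback : List Bool) (contigs_under_minimum_bp_feedback : List Bool) (files : List String) : Prop :=
  files.length ≤ genome_length_feedback.length ∧
  files.length ≤ N50_feedback.length ∧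
  files.length ≤ contigs_under_minimum_bp_feedback.length
instance (genome_length_feedback : List Bool) (N50_feedback : List Bool) (contigs_under_minimum_bp_feedback : List Bool) (files : List String) : Decidable (Pre_get_quality_module_py genome_length_feedback N50_feedback contigs_under_minimum_bp_feedback files) := by unfold Pre_get_quality_module_py; infer_instance

def pvWitness_get_quality_module_py : List Bool × List Bool × List Bool × List String :=
  ([true, false], [true, true], [false, true], ["a.fasta", "b.fasta"])

def Spec_get_quality_module_py (genome_length_feedback : List Bool) (N50_feedback : List Bool) (contigs_under_minimum_bp_feedback : List Bool) (files : List String) (out : List (List String)) : Prop := out = get_quality_module_py_alt genome_length_feedback N50_feedback contigs_under_minimum_bp_feedback files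
instance (genome_length_feedback : List Bool) (N50_feedback : List Bool) (contigs_under_minimum_bp_feedback : List Bool) (files : List String) (out : List (List String)) : Decidable (Spec_get_quality_module_py genome_length_feedback N50_feedback contigs_under_minimum_bp_feedback files out) := by unfold Spec_get_quality_module_py; infer_instance

-- ===== CLAIM (what is proved, stated in full; the proofs are below) =====
def Claim_equal_get_quality_module_py : Prop := ∀ (genome_length_feedback : List Bool) (N50_feedback : List Bool) (contigs_under_minimum_bp_feedback : List Bool) (files : List String), Dom_get_quality_module_py genome_length_feedback N50_feedback contigs_under_minimum_bp_feedback files → Pre_get_quality_module_py genome_length_feedback N50_feedback contigs_under_minimum_bp_feedback files → Spec_get_quality_module_py genome_length_feedback N50_feedback contigs_under_minimum_bp_feedback files (get_quality_module_py genome_length_feedback N50_feedback contigs_under_minimum_bp_feedback files)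

-- ===== LEMMAS AND PROOFS =====

-- the joined per-file message of B's columns
def pvFb (g n c : Bool) : String := pvGlMsg g ++ (pvN50Msg n ++ pvContigsMsg c)

-- A's per-file row equals (B's joined message, status derived from its emptiness);
-- covers the boolean reading of A's chained `&` condition
theorem pvRowA_eq (g n c : Bool) :
    pvRowA g n c = (pvFb g n c, if pvFb g n c == "" then "Passed" else "Failed") := by
  revert g n c; decide

-- the A-side stream of per-file rows, indexed from i
def pvOutA (gl n50 cb : List Bool) : Nat → List String → List (String × String)
  | _, [] => []
  | i, _ :: fs => pvRowA (pvLookupA gl i) (pvLookupA n50 i) (pvLookupA cb i) :: pvOutA gl n50 cb (i + 1) fs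

theorem pvFoldA_eq (gl n50 cb : List Bool) (files : List String) :
    ∀ (i : Nat) (a1 a2 : List String),
      files.foldl (pvStepA gl n50 cb) (i, a1, a2) =
        (i + files.length,
         a1 ++ (pvOutA gl n50 cb i files).map Prod.fst,
         a2 ++ (pvOutA gl n50 cb i files).map Prod.snd) := by
  induction files with
  | nil => intro i a1 a2; simp [pvOutA]
  | cons f fs ih =>
      intro i a1 a2
      simp only [List.foldl_cons, pvStepA, pvOutA, List.map_cons, ih]
      simp [List.append_assoc]
      omega

theorem pvLookupA_getElem (xs : List Bool) (i : Nat) (h : i < xs.length) :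
    pvLookupA xs i = xs[i] := by
  simp [pvLookupA, PySem.List.pyGet?_natCast, List.getElem?_eq_getElem h]

-- the first components of A's rows form B's elementwise-joined columns
theorem pvOutA_fst (files : List String) :
    ∀ (gl n50 cb : List Bool) (i : Nat),
      i + files.length ≤ gl.length → i + files.length ≤ n50.length →
      i + files.length ≤ cb.length →
      (pvOutA gl n50 cb i files).map Prod.fst =
        List.zipWith (fun g mc => g ++ mc) (((gl.drop i).take files.length).map pvGlMsg)
          (List.zipWith (fun m c => m ++ c) (((n50.drop i).take files.length).map pvN50Msg)
            (((cb.drop i).take files.length).map pvContigsMsg)) := by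
  induction files with
  | nil => intro gl n50 cb i _ _ _; simp [pvOutA]
  | cons f fs ih =>
      intro gl n50 cb i h1 h2 h3
      have hg : i < gl.length := by simp at h1 ⊢; omega
      have hn : i < n50.length := by simp at h2 ⊢; omega
      have hc : i < cb.length := by simp at h3 ⊢; omega
      rw [List.drop_eq_getElem_cons hg, List.drop_eq_getElem_cons hn,
          List.drop_eq_getElem_cons hc]
      simp only [pvOutA, List.map_cons, List.length_cons, List.take_succ_cons,
        List.zipWith_cons_cons]
      congr 1
      · rw [pvLookupA_getElem gl i hg, pvLookupA_getElem n50 i hn,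
            pvLookupA_getElem cb i hc, pvRowA_eq, pvFb]
      · have h := ih gl n50 cb (i + 1) (by simp at h1 ⊢; omega)
          (by simp at h2 ⊢; omega) (by simp at h3 ⊢; omega)
        simpa using h

-- the second components are the status column derived from the first components
theorem pvOutA_snd (gl n50 cb : List Bool) (files : List String) :
    ∀ (i : Nat),
      (pvOutA gl n50 cb i files).map Prod.snd =
        ((pvOutA gl n50 cb i files).map Prod.fst).map
          (fun msg => if msg == "" then "Passed" else "Failed") := by
  induction files with
  | nil => intro i; simp [pvOutA]
  | cons f fs ih =>
      intro i
      simp only [pvOutA, List.map_cons, ih, pvRowA_eq]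

-- ===== VERDICT (by name: the statement is the Claim_ definition above) =====
theorem get_quality_module_py_spec : Claim_equal_get_quality_module_py := by
  intro gl n50 cb files _ hpre
  obtain ⟨h1, h2, h3⟩ := hpre
  unfold Spec_get_quality_module_py get_quality_module_py get_quality_module_py_alt
  have hfst := pvOutA_fst files gl n50 cb 0 (by omega) (by omega) (by omega)
  simp only [List.drop_zero] at hfst
  simp only [pvFoldA_eq, List.nil_append, pvOutA_snd, hfst]
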